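-- pv_equiv track=rewrite | github.com/templetwo/threshold-protocols | demo/quick_demo.py | analyze_filename_patterns
-- ===== SOURCE A (Python) =====
-- from collections import defaultdict
-- from typing import Dict, List, Tuple
--
-- def analyze_filename_patterns(files: List[str]) -> Dict[str, List[str]]:
--     """Cluster files by detecting common patterns in filenames"""
--
--     clusters = defaultdict(list)
--
--     for filename in files:
--         # Extract the prefix pattern (everything before the first timestamp or number)
--         parts = filename.split("_")
--
--         if len(parts) >= 2:
--             # Pattern is usually first two parts (e.g., "sensor_temp", "agent_claude")
--             pattern = "_".join(parts[:2])
--             clusters[pattern].append(filename)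
--         else:
--             clusters["uncategorized"].append(filename)
--
--     return dict(clusters)
-- ===== SOURCE B (Python) =====
-- def analyze_filename_patterns(files):
--     """Cluster files by detecting common patterns in filenames.
--
--     Two-pass strategy: compute each file's pattern key once, take the keys
--     in first-occurrence order, then build each cluster by filtering the
--     keyed list — no incremental defaultdict bucketing."""
--
--     def key(filename):
--         parts = filename.split("_")
--         return "_".join(parts[:2]) if len(parts) >= 2 else "uncategorized"
--
--     keyed = [key(f) for f in files]
--     order = list(dict.fromkeys(keyed))
--     return {k: [f for f, kf in zip(files, keyed) if kf == k] for k in order}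
-- ===== Notes on version B (the rewrite author's own statement) =====
-- stated objective: alternative
-- what changed: Replaces the incremental defaultdict bucketing loop by a two-pass scheme: map every filename to its key once, dedup the keys in first-occurrence order, and build each cluster with a filter over the keyed list.
import Mathlib
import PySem

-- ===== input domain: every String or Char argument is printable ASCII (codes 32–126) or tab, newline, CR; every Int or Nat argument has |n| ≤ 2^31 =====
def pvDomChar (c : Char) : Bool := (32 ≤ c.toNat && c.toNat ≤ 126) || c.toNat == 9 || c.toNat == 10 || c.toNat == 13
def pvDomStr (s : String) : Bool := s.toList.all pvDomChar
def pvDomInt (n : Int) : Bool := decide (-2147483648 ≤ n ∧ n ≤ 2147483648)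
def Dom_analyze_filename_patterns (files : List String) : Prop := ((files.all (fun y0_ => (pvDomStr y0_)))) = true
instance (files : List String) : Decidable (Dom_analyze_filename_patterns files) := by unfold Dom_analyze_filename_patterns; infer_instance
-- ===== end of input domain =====

-- B replaces A's incremental defaultdict bucketing by a two-pass scheme (map to keys,
-- dedup the keys, filter per key); same cost class, different traversal (objective: alternative).

-- ===== PORT A =====
def analyze_filename_patterns (files : List String) : List (String × List String) :=
  (files.foldl (fun clusters filename =>
      let parts := (PySem.Str.split? filename "_").getD []  -- sep "_" ≠ "": split? is always some here
      if 2 ≤ parts.length then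
        clusters.modify (PySem.Str.join "_" (PySem.List.slice parts none (some 2))) [] (· ++ [filename])
      else
        clusters.modify "uncategorized" [] (· ++ [filename]))
    PySem.Dict.empty).items

-- ===== PORT B =====
def pvKey (filename : String) : String :=
  let parts := (PySem.Str.split? filename "_").getD []  -- sep "_" ≠ "": split? is always some here
  if 2 ≤ parts.length then PySem.Str.join "_" (PySem.List.slice parts none (some 2))
  else "uncategorized"

def analyze_filename_patterns_alt (files : List String) : List (String × List String) :=
  let keyed := files.map pvKey
  let order := PySem.List.dedup keyed
  order.map (fun k => (k, ((files.zip keyed).filter (fun p => p.2 == k)).map (·.1)))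

-- ===== PRECONDITION & SPEC =====
def Spec_analyze_filename_patterns (files : List String) (out : List (String × List String)) : Prop := out = analyze_filename_patterns_alt files
instance (files : List String) (out : List (String × List String)) : Decidable (Spec_analyze_filename_patterns files out) := by unfold Spec_analyze_filename_patterns; infer_instance

-- ===== CLAIM (what is proved, stated in full; the proofs are below) =====
def Claim_equal_analyze_filename_patterns : Prop := ∀ (files : List String), Dom_analyze_filename_patterns files → Spec_analyze_filename_patterns files (analyze_filename_patterns files)

-- ===== LEMMAS AND PROOFS =====

-- A's loop body, written through the shared key function
theorem pvStepA_eq (clusters : PySem.Dict String (List String)) (filename : String) :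
    (let parts := (PySem.Str.split? filename "_").getD []  -- sep "_" ≠ "": split? is always some here
     if 2 ≤ parts.length then
       clusters.modify (PySem.Str.join "_" (PySem.List.slice parts none (some 2))) [] (· ++ [filename])
     else
       clusters.modify "uncategorized" [] (· ++ [filename]))
    = clusters.modify (pvKey filename) [] (· ++ [filename]) := by
  simp only [pvKey]
  split_ifs <;> rfl

-- B's per-key cluster, as the value-projection of the keyed pair list
theorem pvFilter_eq (files : List String) (k : String) :
    (((files.map (fun f => (pvKey f, f))).filter (fun p => p.1 == k)).map (·.2))
    = (((files.zip (files.map pvKey)).filter (fun p => p.2 == k)).map (·.1)) := by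
  induction files with
  | nil => rfl
  | cons f fs ih =>
    simp only [List.map_cons, List.zip_cons_cons, List.filter_cons]
    by_cases h : pvKey f = k <;> simp [h, ih]

theorem analyze_eq (files : List String) :
    analyze_filename_patterns files = analyze_filename_patterns_alt files := by
  unfold analyze_filename_patterns analyze_filename_patterns_alt
  simp only [pvStepA_eq]
  have hfold :
      files.foldl (fun d f => d.modify (pvKey f) [] (· ++ [f])) PySem.Dict.empty
      = (files.map (fun f => (pvKey f, f))).foldl
          (fun d p => d.modify p.1 [] (· ++ [p.2])) PySem.Dict.empty := by
    rw [List.foldl_map]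
  rw [hfold]
  set l := files.map (fun f => (pvKey f, f)) with hl
  have hnd : ((l.foldl (fun d p => d.modify p.1 [] (· ++ [p.2])) PySem.Dict.empty).keys).Nodup := by
    exact PySem.Dict.nodup_keys_foldl_modify_key l (·.1) [] (fun d p => (· ++ [p.2])) _
      PySem.Dict.nodup_keys_empty
  have hkeys : (l.foldl (fun d p => d.modify p.1 [] (· ++ [p.2])) PySem.Dict.empty).keys
      = PySem.List.dedup (files.map pvKey) := by
    have := PySem.Dict.keys_foldl_modify_key l (·.1) [] (fun d p => (· ++ [p.2]))
      (PySem.Dict.empty : PySem.Dict String (List String))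
    simp only [PySem.Dict.keys_empty] at this
    rw [this, hl, List.map_map]
    simp only [PySem.Set.update_nil_left]
    rfl
  rw [PySem.Dict.items_eq_map_keys _ hnd ([] : List String), hkeys]
  apply List.map_congr_left
  intro k hk
  have hg : (l.foldl (fun d p => d.modify p.1 [] (· ++ [p.2])) PySem.Dict.empty).getD k []
      = (l.filter (fun p => p.1 == k)).map (·.2) := by
    have := PySem.Dict.getD_foldl_modify_append l
      (PySem.Dict.empty : PySem.Dict String (List String)) k
    simpa using this
  rw [hg, hl, pvFilter_eq]

-- ===== VERDICT (by name: the statement is the Claim_ definition above) =====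
theorem analyze_filename_patterns_spec : Claim_equal_analyze_filename_patterns := by
  intro files _
  unfold Spec_analyze_filename_patterns
  exact analyze_eq files
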